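-- pv_equiv track=rewrite | github.com/novac42/chrome-update-digest | src/processors/split_and_process_release_notes.py | reconstruct_with_sections
-- ===== SOURCE A (Python) =====
-- from typing import Dict, List, Optional, Tuple
--
-- def reconstruct_with_sections(sections: Dict[str, str]) -> str:
--     """
--     Reconstruct the full markdown from sections.
--
--     Args:
--         sections: Dictionary of section names to content
--
--     Returns:
--         Reconstructed markdown content
--     """
--     lines = []
--
--     # Add header if present
--     if '_header' in sections:
--         lines.append(sections['_header'])
--
--     # Add sections in a logical order
--     section_order = [
--         'CSS and UI', 'CSS',
--         'HTML and DOM',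
--         'JavaScript',
--         'Web APIs',
--         'Graphics', 'WebGPU',
--         'WebAssembly',
--         'Multimedia', 'Images and media',
--         'Devices',
--         'Performance',
--         'Security', 'Privacy and security',
--         'Service Worker',
--         'Identity',
--         'Payments',
--         'Enterprise',
--         'Browser changes',
--         'Origin trials', 'New origin trials',
--         'Deprecations and removals'
--     ]
--
--     added_sections = set()
--     for section_name in section_order:
--         if section_name in sections and section_name not in added_sections:
--             lines.append(sections[section_name])
--             added_sections.add(section_name)
--
--     # Add any remaining sections not in the order
--     for section_name, content in sections.items():
--         if section_name not in added_sections and not section_name.startswith('_'):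
--             lines.append(content)
--
--     return '\n'.join(lines)
-- ===== SOURCE B (Python) =====
-- def reconstruct_with_sections(sections):
--     """Reconstruct the full markdown from sections (decorate-sort-undecorate)."""
--     section_order = [
--         'CSS and UI', 'CSS',
--         'HTML and DOM',
--         'JavaScript',
--         'Web APIs',
--         'Graphics', 'WebGPU',
--         'WebAssembly',
--         'Multimedia', 'Images and media',
--         'Devices',
--         'Performance',
--         'Security', 'Privacy and security',
--         'Service Worker',
--         'Identity',
--         'Payments',
--         'Enterprise',
--         'Browser changes',
--         'Origin trials', 'New origin trials',
--         'Deprecations and removals'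
--     ]
--     order_index = {name: i for i, name in enumerate(section_order)}
--     fallback = len(section_order)
--     decorated = [(order_index.get(name, fallback), j, content)
--                  for j, (name, content) in enumerate(sections.items())
--                  if not name.startswith('_')]
--     decorated.sort(key=lambda t: (t[0], t[1]))
--     lines = [sections['_header']] if '_header' in sections else []
--     lines.extend(content for _, _, content in decorated)
--     return '\n'.join(lines)
-- ===== Notes on version B (the rewrite author's own statement) =====
-- stated objective: alternative
-- what changed: Replaces A's two sequential passes (a scan over the fixed priority list guarded by an 'added' set, then a leftover scan over the dict) by a single decorate-stable-sort-undecorate pass: each non-underscore item is tagged with (priority rank, insertion position) from a precomputed index and sorted once.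
import Mathlib
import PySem

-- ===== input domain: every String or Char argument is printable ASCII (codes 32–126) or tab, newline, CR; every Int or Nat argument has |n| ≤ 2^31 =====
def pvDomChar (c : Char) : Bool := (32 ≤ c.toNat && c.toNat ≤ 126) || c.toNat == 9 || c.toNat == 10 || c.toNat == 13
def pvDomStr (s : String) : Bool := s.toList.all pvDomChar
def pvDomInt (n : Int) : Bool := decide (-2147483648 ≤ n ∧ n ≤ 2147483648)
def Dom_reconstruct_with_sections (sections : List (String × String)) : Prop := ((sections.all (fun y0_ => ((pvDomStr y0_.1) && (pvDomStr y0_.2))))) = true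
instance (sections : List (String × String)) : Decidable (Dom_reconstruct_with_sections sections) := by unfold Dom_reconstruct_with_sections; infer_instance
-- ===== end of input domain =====

-- B replaces A's two sequential passes by a single decorate-stable-sort-undecorate pass (alternative structure, same cost class).


-- ===== PORT A =====
-- the literal `section_order` list both Python versions contain
def pvOrder : List String :=
  ["CSS and UI", "CSS",
   "HTML and DOM",
   "JavaScript",
   "Web APIs",
   "Graphics", "WebGPU",
   "WebAssembly",
   "Multimedia", "Images and media",
   "Devices",
   "Performance",
   "Security", "Privacy and security",
   "Service Worker",
   "Identity",
   "Payments",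
   "Enterprise",
   "Browser changes",
   "Origin trials", "New origin trials",
   "Deprecations and removals"]

def reconstruct_with_sections (sections : List (String × String)) : String :=
  -- lines = []; if '_header' in sections: lines.append(sections['_header'])
  let lines : List String :=
    match List.lookup "_header" sections with
    | some h => [h]
    | none => []
  -- added_sections = set(); for section_name in section_order: ...
  let st := pvOrder.foldl
    (fun (st : List String × PySem.Set String) name =>
      if (List.lookup name sections).isSome && !(PySem.Set.contains st.2 name) then
        (st.1 ++ [(List.lookup name sections).getD ""], PySem.Set.add st.2 name)
      else st)
    (lines, PySem.Set.empty)
  -- for section_name, content in sections.items(): ...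
  let lines2 : List String := sections.foldl
    (fun (ls : List String) kv =>
      if !(PySem.Set.contains st.2 kv.1) && !(PySem.Str.startswith kv.1 "_") then ls ++ [kv.2]
      else ls)
    st.1
  PySem.Str.join "\n" lines2

-- ===== PORT B =====
-- order_index = {name: i for i, name in enumerate(section_order)}
def pvOrderIndex : PySem.Dict String Int :=
  PySem.Dict.ofList ((PySem.List.enumerate pvOrder 0).map (fun p => (p.2, p.1)))

-- fallback = len(section_order)
def pvFallback : Int := (pvOrder.length : Int)

def reconstruct_with_sections_alt (sections : List (String × String)) : String :=
  -- decorated = [(order_index.get(name, fallback), j, content) for j, (name, content) in enumerate(sections.items()) if not name.startswith('_')]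
  let decorated : List (Int × Int × String) :=
    ((PySem.List.enumerate sections 0).filter
        (fun p => !(PySem.Str.startswith p.2.1 "_"))).map
      (fun p => (pvOrderIndex.getD p.2.1 pvFallback, p.1, p.2.2))
  -- decorated.sort(key=lambda t: (t[0], t[1]))
  let decorated := PySem.List.sorted2 decorated (fun t => t.1) (fun t => t.2.1)
  -- lines = [sections['_header']] if '_header' in sections else []; lines.extend(content for _, _, content in decorated)
  let lines : List String :=
    (match List.lookup "_header" sections with
     | some h => [h]
     | none => []) ++ decorated.map (fun t => t.2.2)
  PySem.Str.join "\n" lines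

-- ===== PRECONDITION & SPEC =====
-- Pre_ excludes lists with duplicate keys: the parameter is a Python dict, which cannot
-- hold duplicate keys, so such lists do not represent any actual input of A.
def Pre_reconstruct_with_sections (sections : List (String × String)) : Prop :=
  (sections.map Prod.fst).Nodup
instance (sections : List (String × String)) : Decidable (Pre_reconstruct_with_sections sections) := by
  unfold Pre_reconstruct_with_sections; infer_instance

def pvWitness_reconstruct_with_sections : (List (String × String)) :=
  [("_header", "# Release"), ("CSS", "css stuff"), ("Zebra", "extra")]

def Spec_reconstruct_with_sections (sections : List (String × String)) (out : String) : Prop :=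
  out = reconstruct_with_sections_alt sections
instance (sections : List (String × String)) (out : String) : Decidable (Spec_reconstruct_with_sections sections out) := by
  unfold Spec_reconstruct_with_sections; infer_instance

-- ===== CLAIM (what is proved, stated in full; the proofs are below) =====
def Claim_equal_reconstruct_with_sections : Prop :=
  ∀ (sections : List (String × String)), Dom_reconstruct_with_sections sections →
    Pre_reconstruct_with_sections sections →
      Spec_reconstruct_with_sections sections (reconstruct_with_sections sections)

-- ===== LEMMAS AND PROOFS =====

-- ---- proof-only abbreviations ----
def pvRank (k : String) : Int := pvOrderIndex.getD k pvFallback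

-- the decorated list of B before sorting
def pvDec (sections : List (String × String)) : List (Int × Int × String) :=
  ((PySem.List.enumerate sections 0).filter
      (fun p => !(PySem.Str.startswith p.2.1 "_"))).map
    (fun p => (pvRank p.2.1, p.1, p.2.2))

-- the priority part of the sorted order, ranked along pvOrder
def pvYsP (sections : List (String × String)) : List (Int × Int × String) :=
  (PySem.List.enumerate pvOrder 0).filterMap (fun q =>
    (List.lookup q.2 sections).map
      (fun v => (q.1, ((sections.map Prod.fst).idxOf q.2 : Int), v)))

-- the leftover part, in insertion order
def pvYsR (sections : List (String × String)) : List (Int × Int × String) :=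
  (pvDec sections).filter (fun t => t.1 == pvFallback)

-- ---- facts about the literal order list / index ----
lemma pv_rank_enum : ∀ p ∈ PySem.List.enumerate pvOrder 0, pvRank p.2 = p.1 := by decide

lemma pv_keys_orderIndex : pvOrderIndex.keys = pvOrder := by decide

lemma pv_order_nodup : pvOrder.Nodup := by decide

lemma pv_order_no_underscore : ∀ name ∈ pvOrder, PySem.Str.startswith name "_" = false := by decide

lemma pv_rank_of_not_mem {k : String} (h : k ∉ pvOrder) : pvRank k = pvFallback := by
  unfold pvRank
  apply PySem.Dict.getD_of_not_contains
  rw [PySem.Dict.contains_eq_decide_mem_keys, pv_keys_orderIndex]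
  simpa using h

lemma pv_rank_of_mem {k : String} (h : k ∈ pvOrder) :
    pvRank k = (List.idxOf k pvOrder : Int) ∧ pvRank k < pvFallback := by
  have hi : List.idxOf k pvOrder < pvOrder.length := List.idxOf_lt_length_of_mem h
  have hget : pvOrder[List.idxOf k pvOrder] = k := List.getElem_idxOf hi
  have hmem : ((0 + (List.idxOf k pvOrder : Int)), k) ∈ PySem.List.enumerate pvOrder 0 := by
    rw [PySem.List.mem_enumerate_iff]
    exact ⟨List.idxOf k pvOrder, hi, by rw [hget]⟩
  have h2 := pv_rank_enum _ hmem
  simp at h2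
  refine ⟨h2, ?_⟩
  rw [h2]; unfold pvFallback; exact_mod_cast hi

lemma pv_rank_eq_fallback_iff (k : String) : pvRank k = pvFallback ↔ k ∉ pvOrder := by
  constructor
  · intro he hm
    exact absurd he (by have := (pv_rank_of_mem hm).2; omega)
  · exact pv_rank_of_not_mem

-- ---- association-list facts (first-match lookup on nodup keys) ----
lemma pv_lookup_isSome_of_mem_keys {k : String} {l : List (String × String)}
    (h : k ∈ l.map Prod.fst) : (List.lookup k l).isSome := by
  induction l with
  | nil => simp at h
  | cons kv t ih =>
    by_cases hk : kv.1 = k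
    · simp [List.lookup, hk]
    · have h' : k ∈ t.map Prod.fst := by
        rcases List.mem_map.mp h with ⟨p, hp, he⟩
        rcases List.mem_cons.mp hp with hp | hp
        · exact absurd (hp ▸ he) hk
        · exact List.mem_map.mpr ⟨p, hp, he⟩
      have hb : (k == kv.1) = false := beq_eq_false_iff_ne.mpr (Ne.symm hk)
      simpa [List.lookup, hb] using ih h'

lemma pv_lookup_of_mem {k v : String} {l : List (String × String)}
    (hnd : (l.map Prod.fst).Nodup) (h : (k, v) ∈ l) : List.lookup k l = some v := by
  induction l with
  | nil => simp at h
  | cons kv t ih =>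
    simp only [List.map_cons, List.nodup_cons] at hnd
    rcases List.mem_cons.mp h with h | h
    · subst h; simp [List.lookup]
    · have hk : kv.1 ≠ k := fun e =>
        hnd.1 (by rw [e]; exact List.mem_map.mpr ⟨(k, v), h, rfl⟩)
      have hb : (k == kv.1) = false := beq_eq_false_iff_ne.mpr (Ne.symm hk)
      simpa [List.lookup, hb] using ih hnd.2 h

lemma pv_mem_of_lookup {k v : String} {l : List (String × String)}
    (h : List.lookup k l = some v) : (k, v) ∈ l := by
  induction l with
  | nil => simp [List.lookup] at h
  | cons kv t ih =>
    by_cases hk : kv.1 = k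
    · have hb : (k == kv.1) = true := beq_iff_eq.mpr hk.symm
      simp only [List.lookup, hb, Option.some.injEq] at h
      exact List.mem_cons.mpr (Or.inl (by rw [← hk, ← h]))
    · have hb : (k == kv.1) = false := beq_eq_false_iff_ne.mpr (Ne.symm hk)
      simp only [List.lookup, hb] at h
      exact List.mem_cons_of_mem _ (ih h)

-- ---- loop characterisations of A ----
lemma pv_loop1 (sections : List (String × String)) (ord : List String) (hord : ord.Nodup)
    (acc : List String) (added : PySem.Set String) (hdisj : ∀ n ∈ ord, n ∉ added) :
    ord.foldl
      (fun (st : List String × PySem.Set String) name =>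
        if (List.lookup name sections).isSome && !(PySem.Set.contains st.2 name) then
          (st.1 ++ [(List.lookup name sections).getD ""], PySem.Set.add st.2 name)
        else st)
      (acc, added)
    = (acc ++ ord.filterMap (fun n => List.lookup n sections),
       added ++ ord.filter (fun n => (List.lookup n sections).isSome)) := by
  induction ord generalizing acc added with
  | nil => simp
  | cons name t ih =>
    simp only [List.nodup_cons] at hord
    have hna : name ∉ added := hdisj name (List.mem_cons_self ..)
    have hc : PySem.Set.contains added name = false := by
      simpa [PySem.Set.contains_eq_decide] using hna
    simp only [List.foldl_cons, List.filterMap_cons, List.filter_cons]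
    cases hl : List.lookup name sections with
    | none =>
      simp only [Option.isSome_none, Bool.false_and, Bool.false_eq_true, if_false]
      rw [ih hord.2 acc added (fun n hn => hdisj n (List.mem_cons_of_mem _ hn))]
    | some v =>
      simp only [Option.isSome_some, hc, Bool.not_false, Bool.and_true, if_true,
        Option.getD_some]
      rw [PySem.Set.add_of_not_mem hna]
      rw [ih hord.2 (acc ++ [v]) (added ++ [name]) ?_]
      · simp
      · intro n hn
        simp only [List.mem_append, List.mem_singleton]
        rintro (h | rfl)
        · exact hdisj n (List.mem_cons_of_mem _ hn) h
        · exact hord.1 hn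

-- ---- generic enumerate helpers ----
lemma pv_enum_filter_map_snd {α β : Type} (xs : List α) (s : Int)
    (q : α → Bool) (h : α → β) :
    ((PySem.List.enumerate xs s).filter (fun p => q p.2)).map (fun p => h p.2)
      = (xs.filter q).map h := by
  induction xs generalizing s with
  | nil => simp [PySem.List.enumerate]
  | cons x t ih =>
    rw [PySem.List.enumerate_cons]
    by_cases hq : q x
    · simp [hq, ih]
    · simp only [Bool.not_eq_true] at hq
      simp [hq, ih]

lemma pv_enum_filterMap_snd {α β : Type} (xs : List α) (s : Int) (F : α → Option β) :
    (PySem.List.enumerate xs s).filterMap (fun p => F p.2) = xs.filterMap F := by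
  induction xs generalizing s with
  | nil => simp [PySem.List.enumerate]
  | cons x t ih =>
    rw [PySem.List.enumerate_cons]
    simp only [List.filterMap_cons]
    cases F x <;> simp [ih]

-- ---- the stable sort, characterised ----
lemma pv_sorted2_eq {α : Type} (xs ys : List α) (k1 k2 : α → Int) (hperm : ys.Perm xs)
    (hp : ys.Pairwise (fun a b => k1 a < k1 b ∨ (k1 a = k1 b ∧ k2 a < k2 b))) :
    PySem.List.sorted2 xs k1 k2 = ys := by
  have hcmp : (fun a b => decide (k1 a < k1 b) || (!decide (k1 b < k1 a) && decide (k2 a < k2 b)))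
      = (fun a b => decide (toLex ((k1 a, k2 a) : Int × Int) < toLex ((k1 b, k2 b) : Int × Int))) := by
    funext a b
    rw [Bool.eq_iff_iff]
    simp only [Bool.or_eq_true, Bool.and_eq_true, Bool.not_eq_true', decide_eq_true_eq,
      decide_eq_false_iff_not, Prod.Lex.lt_iff, ofLex_toLex]
    constructor
    · rintro (h | ⟨h, h'⟩)
      · exact Or.inl h
      · by_cases h1 : k1 a < k1 b
        · exact Or.inl h1
        · exact Or.inr ⟨by omega, h'⟩
    · rintro (h | ⟨h, h'⟩)
      · exact Or.inl h
      · exact Or.inr ⟨by omega, h'⟩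
  have heq : PySem.List.sorted2 xs k1 k2
      = PySem.List.sorted xs (fun a => toLex ((k1 a, k2 a) : Int × Int)) := by
    simp only [PySem.List.sorted2, PySem.List.sorted, Bool.false_eq_true, if_false]
    rw [hcmp]
  rw [heq]
  exact PySem.List.sorted_eq_of_perm_of_pairwise_lt xs ys _ hperm
    (hp.imp (fun h => Prod.Lex.lt_iff.mpr h))

lemma pv_dec_pairwise (sections : List (String × String)) :
    (pvYsP sections ++ pvYsR sections).Pairwise
      (fun a b => a.1 < b.1 ∨ (a.1 = b.1 ∧ a.2.1 < b.2.1)) := by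
  rw [List.pairwise_append]
  refine ⟨?_, ?_, ?_⟩
  · -- within the priority part: strictly increasing first components
    unfold pvYsP
    rw [List.pairwise_filterMap]
    refine (PySem.List.pairwise_lt_enumerate pvOrder 0).imp ?_
    intro q q' hlt b hb b' hb'
    rcases Option.map_eq_some_iff.mp hb with ⟨v, _, rfl⟩
    rcases Option.map_eq_some_iff.mp hb' with ⟨v', _, rfl⟩
    exact Or.inl hlt
  · -- within the leftover part: equal first components, increasing positions
    have hdec : (pvDec sections).Pairwise (fun a b => a.2.1 < b.2.1) := by
      unfold pvDec
      rw [List.pairwise_map]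
      exact ((PySem.List.pairwise_lt_enumerate sections 0).filter _).imp (fun h => h)
    refine (hdec.filter _).imp_of_mem ?_
    intro a b ha hb hlt
    have ha1 : (a.1 == pvFallback) = true := (List.mem_filter.mp ha).2
    have hb1 : (b.1 == pvFallback) = true := (List.mem_filter.mp hb).2
    exact Or.inr ⟨by rw [beq_iff_eq.mp ha1, beq_iff_eq.mp hb1], hlt⟩
  · -- across: priority ranks are < pvFallback, leftover ranks equal pvFallback
    intro a ha b hb
    have hb1 : b.1 = pvFallback := beq_iff_eq.mp (List.mem_filter.mp hb).2
    rcases List.mem_filterMap.mp ha with ⟨q, hq, hsome⟩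
    rcases Option.map_eq_some_iff.mp hsome with ⟨v, _, rfl⟩
    rcases (PySem.List.mem_enumerate_iff pvOrder 0 q).mp hq with ⟨i, hi, rfl⟩
    have : (0 + (i : Int)) < pvFallback := by
      unfold pvFallback; omega
    exact Or.inl (by rw [hb1]; exact this)

lemma pv_dec_perm (sections : List (String × String))
    (hnd : (sections.map Prod.fst).Nodup) :
    (pvYsP sections ++ pvYsR sections).Perm (pvDec sections) := by
  have hdecp : (pvDec sections).Pairwise (fun a b => a.2.1 < b.2.1) := by
    unfold pvDec
    rw [List.pairwise_map]
    exact ((PySem.List.pairwise_lt_enumerate sections 0).filter _).imp (fun h => h)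
  have hnd1 : (pvYsP sections ++ pvYsR sections).Nodup :=
    (pv_dec_pairwise sections).imp_of_mem (by
      intro a b _ _ h he
      subst he
      rcases h with h | ⟨_, h⟩ <;> omega)
  have hnd2 : (pvDec sections).Nodup :=
    hdecp.imp_of_mem (by intro a b _ _ h he; subst he; omega)
  rw [List.perm_ext_iff_of_nodup hnd1 hnd2]
  intro t
  constructor
  · intro ht
    rcases List.mem_append.mp ht with ht | ht
    · -- priority element: find its pair in sections
      rcases List.mem_filterMap.mp ht with ⟨q, hq, hsome⟩
      rcases Option.map_eq_some_iff.mp hsome with ⟨v, hlk, rfl⟩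
      rcases (PySem.List.mem_enumerate_iff pvOrder 0 q).mp hq with ⟨i, hi, rfl⟩
      have hlk' : List.lookup pvOrder[i] sections = some v := hlk
      have hkmem : pvOrder[i] ∈ pvOrder := List.getElem_mem hi
      have hpair : (pvOrder[i], v) ∈ sections := pv_mem_of_lookup hlk'
      have hkin : pvOrder[i] ∈ sections.map Prod.fst := List.mem_map.mpr ⟨_, hpair, rfl⟩
      have hjm : List.idxOf pvOrder[i] (sections.map Prod.fst) < (sections.map Prod.fst).length :=
        List.idxOf_lt_length_of_mem hkin
      have hjlen : List.idxOf pvOrder[i] (sections.map Prod.fst) < sections.length := by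
        simpa using hjm
      have hkey : (sections[List.idxOf pvOrder[i] (sections.map Prod.fst)]'hjlen).1 = pvOrder[i] := by
        have h := List.getElem_idxOf (x := pvOrder[i]) (xs := sections.map Prod.fst) hjm
        rw [List.getElem_map] at h
        exact h
      have hval : (sections[List.idxOf pvOrder[i] (sections.map Prod.fst)]'hjlen).2 = v := by
        have h1 : List.lookup (sections[List.idxOf pvOrder[i] (sections.map Prod.fst)]'hjlen).1 sections
            = some (sections[List.idxOf pvOrder[i] (sections.map Prod.fst)]'hjlen).2 :=
          pv_lookup_of_mem hnd (List.getElem_mem hjlen)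
        rw [hkey, hlk'] at h1
        exact (Option.some.inj h1).symm
      unfold pvDec
      refine List.mem_map.mpr
        ⟨((List.idxOf pvOrder[i] (sections.map Prod.fst) : Int),
          sections[List.idxOf pvOrder[i] (sections.map Prod.fst)]'hjlen), ?_, ?_⟩
      · refine List.mem_filter.mpr ⟨?_, ?_⟩
        · rw [PySem.List.mem_enumerate_iff]
          exact ⟨List.idxOf pvOrder[i] (sections.map Prod.fst), hjlen, by simp⟩
        · have h2 := pv_order_no_underscore _ hkmem
          simp [hkey]
          simpa using h2
      · have hrk : pvRank pvOrder[i] = (0 + (i : Int)) :=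
          pv_rank_enum _ ((PySem.List.mem_enumerate_iff pvOrder 0 _).mpr ⟨i, hi, rfl⟩)
        simp [hkey, hval, hrk]
    · exact (List.mem_filter.mp ht).1
  · intro ht
    unfold pvDec at ht
    rcases List.mem_map.mp ht with ⟨p, hp, rfl⟩
    have hpf := List.mem_filter.mp hp
    rcases (PySem.List.mem_enumerate_iff sections 0 p).mp hpf.1 with ⟨j, hjlen, rfl⟩
    have hus : PySem.Str.startswith (sections[j]'hjlen).1 "_" = false := by
      simpa using hpf.2
    by_cases hmem : (sections[j]'hjlen).1 ∈ pvOrder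
    · -- priority pair: it is in pvYsP
      apply List.mem_append.mpr
      left
      have hio : List.idxOf (sections[j]'hjlen).1 pvOrder < pvOrder.length :=
        List.idxOf_lt_length_of_mem hmem
      unfold pvYsP
      refine List.mem_filterMap.mpr
        ⟨((List.idxOf (sections[j]'hjlen).1 pvOrder : Int), (sections[j]'hjlen).1), ?_, ?_⟩
      · rw [PySem.List.mem_enumerate_iff]
        exact ⟨List.idxOf (sections[j]'hjlen).1 pvOrder, hio, by simp [List.getElem_idxOf hio]⟩
      · have hlk : List.lookup (sections[j]'hjlen).1 sections = some (sections[j]'hjlen).2 :=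
          pv_lookup_of_mem hnd (List.getElem_mem hjlen)
        rw [hlk]
        have hj' : List.idxOf (sections[j]'hjlen).1 (sections.map Prod.fst) = j := by
          have hh : (sections.map Prod.fst)[j]'(by simpa using hjlen) = (sections[j]'hjlen).1 := by
            simp
          rw [← hh]
          exact hnd.idxOf_getElem j (by simpa using hjlen)
        have hrk : pvRank (sections[j]'hjlen).1 = (List.idxOf (sections[j]'hjlen).1 pvOrder : Int) :=
          (pv_rank_of_mem hmem).1
        simp [hrk, hj']
    · -- leftover pair: it is in pvYsR
      apply List.mem_append.mpr
      right
      refine List.mem_filter.mpr ⟨List.mem_map.mpr ⟨_, hp, rfl⟩, ?_⟩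
      simp [pv_rank_of_not_mem hmem]

-- ---- the two payload maps agree with A's two passes ----
lemma pv_ysP_map (sections : List (String × String)) :
    (pvYsP sections).map (fun t => t.2.2)
      = pvOrder.filterMap (fun n => List.lookup n sections) := by
  unfold pvYsP
  rw [List.map_filterMap]
  simp only [Option.map_map]
  have : (fun (q : Int × String) =>
      Option.map ((fun (t : Int × Int × String) => t.2.2) ∘
        fun v => (q.1, ((sections.map Prod.fst).idxOf q.2 : Int), v)) (List.lookup q.2 sections))
      = (fun (q : Int × String) => List.lookup q.2 sections) := by
    funext q
    cases List.lookup q.2 sections <;> rfl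
  rw [this, pv_enum_filterMap_snd pvOrder 0 (fun n => List.lookup n sections)]

lemma pv_ysR_map (sections : List (String × String)) :
    (pvYsR sections).map (fun t => t.2.2)
      = (sections.filter
          (fun kv => !(PySem.Set.contains
                (pvOrder.filter (fun n => (List.lookup n sections).isSome)) kv.1)
              && !(PySem.Str.startswith kv.1 "_"))).map Prod.snd := by
  unfold pvYsR pvDec
  rw [List.filter_map, List.map_map, List.filter_filter]
  have h1 : ((PySem.List.enumerate sections 0).filter
        (fun p => ((fun (t : Int × Int × String) => t.1 == pvFallback) ∘
            fun p => (pvRank p.2.1, p.1, p.2.2)) p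
          && !(PySem.Str.startswith p.2.1 "_"))).map
        (((fun (t : Int × Int × String) => t.2.2) ∘ fun p => (pvRank p.2.1, p.1, p.2.2)))
      = ((PySem.List.enumerate sections 0).filter
          (fun p => (fun kv : String × String =>
              (pvRank kv.1 == pvFallback) && !(PySem.Str.startswith kv.1 "_")) p.2)).map
        (fun p => (fun kv : String × String => kv.2) p.2) := rfl
  rw [h1, pv_enum_filter_map_snd sections 0
    (fun kv : String × String => (pvRank kv.1 == pvFallback) && !(PySem.Str.startswith kv.1 "_"))
    (fun kv : String × String => kv.2)]
  congr 1
  apply List.filter_congr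
  intro kv hkv
  have hsome : (List.lookup kv.1 sections).isSome :=
    pv_lookup_isSome_of_mem_keys (List.mem_map.mpr ⟨kv, hkv, rfl⟩)
  have hmemf : kv.1 ∈ pvOrder.filter (fun n => (List.lookup n sections).isSome)
      ↔ kv.1 ∈ pvOrder := by
    simp [List.mem_filter, hsome]
  congr 1
  rw [Bool.eq_iff_iff]
  simp only [beq_iff_eq, Bool.not_eq_true', PySem.Set.contains_eq_decide,
    decide_eq_false_iff_not]
  rw [pv_rank_eq_fallback_iff, hmemf]

-- ===== VERDICT (by name: the statement is the Claim_ definition above) =====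
theorem reconstruct_with_sections_spec : Claim_equal_reconstruct_with_sections := by
  intro sections _ hnd
  unfold Spec_reconstruct_with_sections reconstruct_with_sections reconstruct_with_sections_alt
  simp only []
  rw [pv_loop1 sections pvOrder pv_order_nodup _ PySem.Set.empty (by intro n _ h; simp [PySem.Set.empty] at h)]
  rw [PySem.List.foldl_append_if
    (p := fun kv : String × String =>
      !(PySem.Set.contains
          (PySem.Set.empty ++ pvOrder.filter (fun n => (List.lookup n sections).isSome)) kv.1)
        && !(PySem.Str.startswith kv.1 "_"))
    (f := fun kv : String × String => kv.2)]
  have hdecEq : ((PySem.List.enumerate sections 0).filter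
        (fun p => !(PySem.Str.startswith p.2.1 "_"))).map
      (fun p => (pvOrderIndex.getD p.2.1 pvFallback, p.1, p.2.2)) = pvDec sections := rfl
  rw [hdecEq]
  rw [pv_sorted2_eq (pvDec sections) (pvYsP sections ++ pvYsR sections) _ _
    (pv_dec_perm sections hnd) (pv_dec_pairwise sections)]
  rw [List.map_append, pv_ysP_map, pv_ysR_map sections]
  have hempty : (PySem.Set.empty ++ pvOrder.filter (fun n => (List.lookup n sections).isSome))
      = pvOrder.filter (fun n => (List.lookup n sections).isSome) := List.nil_append _
  rw [hempty]
  rw [List.append_assoc]
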